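-- pv_equiv track=rewrite | github.com/HoiAlice/balance | spectrum.py | strongly_le
-- ===== SOURCE A (Python) =====
-- def strongly_le(left_spec: tuple[int], right_spec: tuple[int]) -> bool:
--     """Defines << order over spectrum."""
--
--     size = len(left_spec)
--     if len(right_spec) != size:
--         raise ValueError("Both spectrum should be over same set.")
--     left_indexes = {index for index in range(size) if left_spec[index] == 1 and right_spec[index] == 0}
--     right_indexes = {index for index in range(size) if left_spec[index] == 0 and right_spec[index] == 1}
--     if len(left_indexes) == 0 or len(right_indexes) == 0:
--         return True
--     return max(left_indexes) < min(right_indexes)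
-- ===== SOURCE B (Python) =====
-- def strongly_le(left_spec, right_spec):
--     """Defines << order over spectrum."""
--
--     if len(right_spec) != len(left_spec):
--         raise ValueError("Both spectrum should be over same set.")
--     # A violation of << is a (0,1) position strictly before a (1,0) position.
--     # Scan the zipped pair sequence as a two-state automaton and exit early.
--     seen_right = False
--     for l, r in zip(left_spec, right_spec):
--         if l == 1 and r == 0:
--             if seen_right:
--                 return False
--         elif l == 0 and r == 1:
--             seen_right = True
--     return True
-- ===== Notes on version B (the rewrite author's own statement) =====
-- stated objective: alternative
-- what changed: B reformulates << as the absence of the forbidden pattern '(0,1) strictly before (1,0)' in the zipped pair sequence and checks it with a two-state automaton with early exit, instead of A's index-set comprehensions with max/min reductions.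
import Mathlib
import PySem

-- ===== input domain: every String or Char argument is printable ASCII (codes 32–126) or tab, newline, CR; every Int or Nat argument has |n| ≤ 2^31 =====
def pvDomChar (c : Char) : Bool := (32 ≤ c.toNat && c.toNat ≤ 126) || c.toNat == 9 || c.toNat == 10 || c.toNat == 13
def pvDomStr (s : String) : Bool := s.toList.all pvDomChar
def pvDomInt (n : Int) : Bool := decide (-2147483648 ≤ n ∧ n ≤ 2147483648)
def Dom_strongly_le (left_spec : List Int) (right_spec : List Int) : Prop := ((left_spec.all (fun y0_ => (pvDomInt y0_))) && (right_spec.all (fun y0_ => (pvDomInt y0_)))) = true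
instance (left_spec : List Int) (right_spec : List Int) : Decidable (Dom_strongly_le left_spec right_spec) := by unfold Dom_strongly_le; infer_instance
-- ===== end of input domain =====

-- B reformulates << as absence of the pattern "a (0,1) position strictly before a (1,0) position"
-- in the zipped pair sequence, checked by a two-state automaton with early exit, instead of A's
-- index-set comprehensions with max/min reductions (objective: alternative, same O(n)).

-- ===== PORT A =====
def strongly_le (left_spec : List Int) (right_spec : List Int) : Bool :=
  let size : Int := PySem.List.len left_spec
  if PySem.List.len right_spec ≠ size then false  -- Python raises ValueError here; excluded by Pre_
  else
    let left_indexes : PySem.Set Int :=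
      PySem.Set.ofList ((PySem.List.pyRange 0 size 1).filter
        (fun index => PySem.List.pyGetD left_spec index 0 == 1 && PySem.List.pyGetD right_spec index 0 == 0))
    let right_indexes : PySem.Set Int :=
      PySem.Set.ofList ((PySem.List.pyRange 0 size 1).filter
        (fun index => PySem.List.pyGetD left_spec index 0 == 0 && PySem.List.pyGetD right_spec index 0 == 1))
    if PySem.Set.len left_indexes == 0 || PySem.Set.len right_indexes == 0 then true
    else
      match PySem.List.max? left_indexes (fun x => x), PySem.List.min? right_indexes (fun x => x) with
      | some a, some b => decide (a < b)
      | _, _ => true  -- unreachable: both sets nonempty here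

-- ===== PORT B =====
-- the for-loop with early 'return False' and the boolean flag seen_right
def slAltLoop : List (Int × Int) → Bool → Bool
  | [], _ => true
  | p :: rest, seen =>
    if p.1 == 1 && p.2 == 0 then
      (if seen then false else slAltLoop rest seen)
    else if p.1 == 0 && p.2 == 1 then slAltLoop rest true
    else slAltLoop rest seen

def strongly_le_alt (left_spec : List Int) (right_spec : List Int) : Bool :=
  if PySem.List.len right_spec ≠ PySem.List.len left_spec then false  -- Python raises ValueError here; excluded by Pre_
  else slAltLoop (left_spec.zip right_spec) false

-- ===== PRECONDITION & SPEC =====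
-- Pre_ excludes exactly the inputs of unequal length, on which Python A raises ValueError.
def Pre_strongly_le (left_spec : List Int) (right_spec : List Int) : Prop :=
  left_spec.length = right_spec.length
instance (left_spec : List Int) (right_spec : List Int) : Decidable (Pre_strongly_le left_spec right_spec) := by unfold Pre_strongly_le; infer_instance

def pvWitness_strongly_le : List Int × List Int := ([1, 0, 0], [1, 0, 1])

def Spec_strongly_le (left_spec : List Int) (right_spec : List Int) (out : Bool) : Prop := out = strongly_le_alt left_spec right_spec
instance (left_spec : List Int) (right_spec : List Int) (out : Bool) : Decidable (Spec_strongly_le left_spec right_spec out) := by unfold Spec_strongly_le; infer_instance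

-- ===== CLAIM (what is proved, stated in full; the proofs are below) =====
def Claim_equal_strongly_le : Prop := ∀ (left_spec : List Int) (right_spec : List Int), Dom_strongly_le left_spec right_spec → Pre_strongly_le left_spec right_spec → Spec_strongly_le left_spec right_spec (strongly_le left_spec right_spec)

-- ===== LEMMAS AND PROOFS =====

-- The common specification both programs are reduced to: no (0,1) pair strictly before a (1,0) pair.
def NoViol (ps : List (Int × Int)) : Prop :=
  ∀ n m : Nat, n < m → ps[n]? = some ((0 : Int), (1 : Int)) → ps[m]? ≠ some ((1 : Int), (0 : Int))

-- B's loop in the seen_right = true state: succeeds iff no (1,0) pair remains.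
theorem slAltLoop_true (ps : List (Int × Int)) :
    slAltLoop ps true = true ↔ ((1 : Int), (0 : Int)) ∉ ps := by
  induction ps with
  | nil => simp [slAltLoop]
  | cons p ps ih =>
    obtain ⟨a, b⟩ := p
    by_cases h : a = 1 ∧ b = 0
    · obtain ⟨h1, h2⟩ := h
      subst h1; subst h2
      simp [slAltLoop]
    · have hc : ((a == 1 && b == 0) = false) := by
        rcases not_and_or.mp h with h1 | h1 <;> simp [h1]
      have hstep : slAltLoop ((a, b) :: ps) true = slAltLoop ps true := by
        simp only [slAltLoop, hc, Bool.false_eq_true, if_false]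
        split <;> rfl
      have hne : ¬ ((1 : Int), (0 : Int)) = (a, b) := by
        intro he
        rw [Prod.mk.injEq] at he
        exact h ⟨he.1.symm, he.2.symm⟩
      rw [hstep, ih, List.mem_cons]
      tauto

-- Shift lemma: a head that is not (0,1) does not affect the no-violation condition,
-- since every violating (1,0) sits at index ≥ 1.
theorem noViol_cons_of_ne (x : Int × Int) (ps : List (Int × Int))
    (hx : x ≠ ((0 : Int), (1 : Int))) : NoViol (x :: ps) ↔ NoViol ps := by
  constructor
  · intro h n m hnm h1 h2
    exact h (n + 1) (m + 1) (by omega) (by simpa using h1) (by simpa using h2)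
  · intro h n m hnm h1 h2
    cases n with
    | zero =>
      simp only [List.getElem?_cons_zero, Option.some.injEq] at h1
      exact hx h1
    | succ k =>
      cases m with
      | zero => omega
      | succ j =>
        exact h k j (by omega) (by simpa using h1) (by simpa using h2)

-- B's loop in the initial state computes exactly NoViol.
theorem slAltLoop_false (ps : List (Int × Int)) :
    slAltLoop ps false = true ↔ NoViol ps := by
  induction ps with
  | nil =>
    simp only [slAltLoop, true_iff]
    intro n m _ h1
    simp at h1
  | cons p ps ih =>
    obtain ⟨a, b⟩ := p
    by_cases hq : a = 0 ∧ b = 1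
    · obtain ⟨h1, h2⟩ := hq
      subst h1; subst h2
      have hstep : slAltLoop (((0 : Int), (1 : Int)) :: ps) false = slAltLoop ps true := by
        simp [slAltLoop]
      rw [hstep, slAltLoop_true]
      constructor
      · intro hmem n m hnm hn hm
        cases n with
        | zero =>
          apply hmem
          cases m with
          | zero => omega
          | succ j =>
            simp only [List.getElem?_cons_succ] at hm
            exact List.mem_iff_getElem?.mpr ⟨j, hm⟩
        | succ k =>
          cases m with
          | zero => omega
          | succ j =>
            apply hmem
            simp only [List.getElem?_cons_succ] at hm
            exact List.mem_iff_getElem?.mpr ⟨j, hm⟩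
      · intro hnv hmem
        obtain ⟨j, hj⟩ := List.mem_iff_getElem?.mp hmem
        exact hnv 0 (j + 1) (by omega) (by simp) (by simpa using hj)
    · have hqc : ((a == 0 && b == 1) = false) := by
        rcases not_and_or.mp hq with h1 | h1 <;> simp [h1]
      have hstep : slAltLoop ((a, b) :: ps) false = slAltLoop ps false := by
        simp only [slAltLoop, hqc, Bool.false_eq_true, if_false]
        split <;> rfl
      have hne : (a, b) ≠ ((0 : Int), (1 : Int)) := by
        intro he
        rw [Prod.mk.injEq] at he
        exact hq he
      rw [hstep, ih, noViol_cons_of_ne _ _ hne]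

-- Membership in A's filtered index lists, in terms of the zipped pair sequence.
theorem mem_filterP (l r : List Int) (hlen : l.length = r.length) (i : Int) :
    (i ∈ (PySem.List.pyRange 0 (PySem.List.len l) 1).filter
        (fun index => PySem.List.pyGetD l index 0 == 1 && PySem.List.pyGetD r index 0 == 0))
      ↔ ∃ k : Nat, i = (k : Int) ∧ (l.zip r)[k]? = some ((1 : Int), (0 : Int)) := by
  rw [List.mem_filter, PySem.List.mem_pyRange_one]
  have hzlen : (l.zip r).length = l.length := by rw [List.length_zip, hlen, Nat.min_self]
  constructor
  · rintro ⟨⟨h0, hn⟩, hp⟩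
    refine ⟨i.toNat, by omega, ?_⟩
    have hk : i.toNat < (l.zip r).length := by
      simp only [PySem.List.len_eq] at hn; omega
    have hkl : i.toNat < l.length := by rwa [hzlen] at hk
    have hkr : i.toNat < r.length := by omega
    rw [List.getElem?_eq_getElem hk, List.getElem_zip]
    have hn' : i < (l.length : Int) := by simp only [PySem.List.len_eq] at hn; omega
    have hnr : i < (r.length : Int) := by omega
    rw [PySem.List.pyGetD_eq_getElem l 0 h0 hn',
        PySem.List.pyGetD_eq_getElem r 0 h0 hnr] at hp
    simp only [Bool.and_eq_true, beq_iff_eq] at hp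
    simp [hp.1, hp.2]
  · rintro ⟨k, rfl, hk⟩
    obtain ⟨hklt, hkv⟩ := List.getElem?_eq_some_iff.mp hk
    rw [List.getElem_zip, Prod.mk.injEq] at hkv
    have hkl : k < l.length := by rwa [hzlen] at hklt
    have h0 : (0 : Int) ≤ (k : Int) := by omega
    have hn : (k : Int) < PySem.List.len l := by simp only [PySem.List.len_eq]; omega
    have hn' : (k : Int) < (l.length : Int) := by omega
    have hnr : (k : Int) < (r.length : Int) := by omega
    refine ⟨⟨h0, hn⟩, ?_⟩
    rw [PySem.List.pyGetD_eq_getElem l 0 h0 hn',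
        PySem.List.pyGetD_eq_getElem r 0 h0 hnr]
    simp only [Int.toNat_natCast]
    simp [hkv.1, hkv.2]

theorem mem_filterQ (l r : List Int) (hlen : l.length = r.length) (i : Int) :
    (i ∈ (PySem.List.pyRange 0 (PySem.List.len l) 1).filter
        (fun index => PySem.List.pyGetD l index 0 == 0 && PySem.List.pyGetD r index 0 == 1))
      ↔ ∃ k : Nat, i = (k : Int) ∧ (l.zip r)[k]? = some ((0 : Int), (1 : Int)) := by
  rw [List.mem_filter, PySem.List.mem_pyRange_one]
  have hzlen : (l.zip r).length = l.length := by rw [List.length_zip, hlen, Nat.min_self]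
  constructor
  · rintro ⟨⟨h0, hn⟩, hp⟩
    refine ⟨i.toNat, by omega, ?_⟩
    have hk : i.toNat < (l.zip r).length := by
      simp only [PySem.List.len_eq] at hn; omega
    rw [List.getElem?_eq_getElem hk, List.getElem_zip]
    have hn' : i < (l.length : Int) := by simp only [PySem.List.len_eq] at hn; omega
    have hnr : i < (r.length : Int) := by omega
    rw [PySem.List.pyGetD_eq_getElem l 0 h0 hn',
        PySem.List.pyGetD_eq_getElem r 0 h0 hnr] at hp
    simp only [Bool.and_eq_true, beq_iff_eq] at hp
    simp [hp.1, hp.2]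
  · rintro ⟨k, rfl, hk⟩
    obtain ⟨hklt, hkv⟩ := List.getElem?_eq_some_iff.mp hk
    rw [List.getElem_zip, Prod.mk.injEq] at hkv
    have hkl : k < l.length := by rwa [hzlen] at hklt
    have h0 : (0 : Int) ≤ (k : Int) := by omega
    have hn : (k : Int) < PySem.List.len l := by simp only [PySem.List.len_eq]; omega
    have hn' : (k : Int) < (l.length : Int) := by omega
    have hnr : (k : Int) < (r.length : Int) := by omega
    refine ⟨⟨h0, hn⟩, ?_⟩
    rw [PySem.List.pyGetD_eq_getElem l 0 h0 hn',
        PySem.List.pyGetD_eq_getElem r 0 h0 hnr]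
    simp only [Int.toNat_natCast]
    simp [hkv.1, hkv.2]

-- On an increasing list, max?/min? compute getLast?/head?, which are the max/min values.
theorem max?_of_increasing (xs : List Int) (h : xs.Pairwise (· < ·)) :
    PySem.List.max? xs (fun x => x) = xs.getLast? := by
  induction xs using List.reverseRecOn with
  | nil => rfl
  | append_singleton xs y ih =>
    have hparts := List.pairwise_append.mp h
    cases hl : xs.getLast? with
    | none =>
      have hxs : xs = [] := List.getLast?_eq_none_iff.mp hl
      subst hxs
      simp [PySem.List.max?]
    | some m =>
      have hmax : PySem.List.max? xs (fun x => x) = some m := by rw [ih hparts.1, hl]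
      have hmlt : m < y := hparts.2.2 m (List.mem_of_getLast? hl) y (by simp)
      simp only [PySem.List.max?] at hmax ⊢
      rw [List.foldl_append, hmax, List.foldl_cons, List.foldl_nil]
      simp [hmlt, List.getLast?_append]

theorem min?_of_increasing (xs : List Int) (h : xs.Pairwise (· < ·)) :
    PySem.List.min? xs (fun x => x) = xs.head? := by
  induction xs using List.reverseRecOn with
  | nil => rfl
  | append_singleton xs y ih =>
    have hparts := List.pairwise_append.mp h
    cases hh : xs.head? with
    | none =>
      have hxs : xs = [] := List.head?_eq_none_iff.mp hh
      subst hxs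
      simp [PySem.List.min?]
    | some m =>
      have hmin : PySem.List.min? xs (fun x => x) = some m := by rw [ih hparts.1, hh]
      have hmlt : m < y := hparts.2.2 m (List.mem_of_head? hh) y (by simp)
      have hnlt : ¬ y < m := by omega
      simp only [PySem.List.min?] at hmin ⊢
      rw [List.foldl_append, hmin, List.foldl_cons, List.foldl_nil]
      simp [hnlt, hh]

theorem le_getLast_of_increasing (xs : List Int) (h : xs.Pairwise (· < ·)) (la : Int)
    (hla : xs.getLast? = some la) : ∀ x ∈ xs, x ≤ la := by
  obtain ⟨ys, rfl⟩ := List.getLast?_eq_some_iff.mp hla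
  have hparts := List.pairwise_append.mp h
  intro x hx
  rcases List.mem_append.mp hx with hy | hy
  · exact le_of_lt (hparts.2.2 x hy la (by simp))
  · simp at hy; omega

theorem head_le_of_increasing (xs : List Int) (h : xs.Pairwise (· < ·)) (fb : Int)
    (hfb : xs.head? = some fb) : ∀ x ∈ xs, fb ≤ x := by
  obtain ⟨ys, rfl⟩ := List.head?_eq_some_iff.mp hfb
  rw [List.pairwise_cons] at h
  intro x hx
  rcases List.mem_cons.mp hx with rfl | hy
  · omega
  · exact le_of_lt (h.1 x hy)

-- ===== VERDICT (by name: the statement is the Claim_ definition above) =====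
theorem strongly_le_spec : Claim_equal_strongly_le := by
  intro l r _ hpre
  unfold Spec_strongly_le strongly_le strongly_le_alt
  have hpre' : l.length = r.length := hpre
  have hlen : ¬ (PySem.List.len r ≠ PySem.List.len l) := by simp [PySem.List.len_eq, hpre']
  dsimp only
  rw [if_neg hlen, if_neg hlen]
  rw [Bool.eq_iff_iff, slAltLoop_false]
  set P := (PySem.List.pyRange 0 (PySem.List.len l) 1).filter
    (fun index => PySem.List.pyGetD l index 0 == 1 && PySem.List.pyGetD r index 0 == 0) with hP
  set Q := (PySem.List.pyRange 0 (PySem.List.len l) 1).filter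
    (fun index => PySem.List.pyGetD l index 0 == 0 && PySem.List.pyGetD r index 0 == 1) with hQ
  have hnodP : P.Nodup := (PySem.List.nodup_pyRange_one 0 (PySem.List.len l)).filter _
  have hnodQ : Q.Nodup := (PySem.List.nodup_pyRange_one 0 (PySem.List.len l)).filter _
  have hsortP : P.Pairwise (· < ·) :=
    (PySem.List.pairwise_lt_pyRange_one 0 (PySem.List.len l)).filter _
  have hsortQ : Q.Pairwise (· < ·) :=
    (PySem.List.pairwise_lt_pyRange_one 0 (PySem.List.len l)).filter _
  rw [PySem.Set.ofList_eq_self_of_nodup _ hnodP, PySem.Set.ofList_eq_self_of_nodup _ hnodQ]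
  by_cases hfp : P = []
  · rw [hfp]
    simp only [PySem.Set.len, List.length_nil, Nat.cast_zero, beq_self_eq_true, Bool.true_or,
      if_true, true_iff]
    intro n m _ _ hm
    exact (List.ne_nil_of_mem ((mem_filterP l r hpre' (m : Int)).mpr ⟨m, rfl, hm⟩)) hfp
  · by_cases hfq : Q = []
    · rw [hfq]
      simp only [PySem.Set.len, List.length_nil, Nat.cast_zero, beq_self_eq_true, Bool.or_true,
        if_true, true_iff]
      intro n m _ hn _
      exact (List.ne_nil_of_mem ((mem_filterQ l r hpre' (n : Int)).mpr ⟨n, rfl, hn⟩)) hfq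
    · obtain ⟨la, hla⟩ : ∃ la, P.getLast? = some la := by
        cases h : P.getLast? with
        | none => exact absurd (List.getLast?_eq_none_iff.mp h) hfp
        | some y => exact ⟨y, rfl⟩
      obtain ⟨fb, hfb⟩ : ∃ fb, Q.head? = some fb := by
        cases h : Q.head? with
        | none => exact absurd (List.head?_eq_none_iff.mp h) hfq
        | some y => exact ⟨y, rfl⟩
      have hl1 : ¬ ((PySem.Set.len P == 0 || PySem.Set.len Q == 0) = true) := by
        simp only [PySem.Set.len, Bool.or_eq_true, beq_iff_eq]
        push Not
        refine ⟨?_, ?_⟩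
        · intro h; exact hfp (List.length_eq_zero_iff.mp (by exact_mod_cast h))
        · intro h; exact hfq (List.length_eq_zero_iff.mp (by exact_mod_cast h))
      rw [if_neg hl1, max?_of_increasing _ hsortP, min?_of_increasing _ hsortQ, hla, hfb]
      simp only [decide_eq_true_eq]
      -- la < fb ↔ NoViol (l.zip r)
      obtain ⟨ka, hka_eq, hka⟩ := (mem_filterP l r hpre' la).mp (List.mem_of_getLast? hla)
      obtain ⟨kb, hkb_eq, hkb⟩ := (mem_filterQ l r hpre' fb).mp (List.mem_of_head? hfb)
      constructor
      · intro hlt n m hnm hn hm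
        have hmP : ((m : Int)) ≤ la :=
          le_getLast_of_increasing P hsortP la hla _ ((mem_filterP l r hpre' _).mpr ⟨m, rfl, hm⟩)
        have hnQ : fb ≤ ((n : Int)) :=
          head_le_of_increasing Q hsortQ fb hfb _ ((mem_filterQ l r hpre' _).mpr ⟨n, rfl, hn⟩)
        omega
      · intro hnv
        by_contra hge
        have hne : ka ≠ kb := by
          intro he
          rw [he, hkb] at hka
          simp at hka
        have hkblt : kb < ka := by omega
        exact hnv kb ka hkblt hkb hka
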